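-- pv_equiv track=rewrite | github.com/Trietptm-on-Coding-Algorithms/KPI-FICT-security | lab1/functions.py | generateKeys
-- ===== SOURCE A (Python) =====
-- def generateKeys(c0de_1, c0de_2, c0de_3, c0de_4):
--     key_candidates = []
--     for l1 in c0de_1:
--         for l2 in c0de_2:
--             for l3 in c0de_3:
--                 for l4 in c0de_4:
--                     key_candidates.append(str(l1 + l2 + l3 + l4))
--     return key_candidates
-- ===== SOURCE B (Python) =====
-- def generateKeys(c0de_1, c0de_2, c0de_3, c0de_4):
--     acc = list(c0de_1)
--     for seq in (c0de_2, c0de_3, c0de_4):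
--         acc = [a + b for a in acc for b in seq]
--     return [str(x) for x in acc]
-- ===== Notes on version B (the rewrite author's own statement) =====
-- stated objective: alternative
-- what changed: Replaces the depth-4 nested loop with a fold that grows a list of partial sums one sequence at a time, converting to strings only at the end.
import Mathlib
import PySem

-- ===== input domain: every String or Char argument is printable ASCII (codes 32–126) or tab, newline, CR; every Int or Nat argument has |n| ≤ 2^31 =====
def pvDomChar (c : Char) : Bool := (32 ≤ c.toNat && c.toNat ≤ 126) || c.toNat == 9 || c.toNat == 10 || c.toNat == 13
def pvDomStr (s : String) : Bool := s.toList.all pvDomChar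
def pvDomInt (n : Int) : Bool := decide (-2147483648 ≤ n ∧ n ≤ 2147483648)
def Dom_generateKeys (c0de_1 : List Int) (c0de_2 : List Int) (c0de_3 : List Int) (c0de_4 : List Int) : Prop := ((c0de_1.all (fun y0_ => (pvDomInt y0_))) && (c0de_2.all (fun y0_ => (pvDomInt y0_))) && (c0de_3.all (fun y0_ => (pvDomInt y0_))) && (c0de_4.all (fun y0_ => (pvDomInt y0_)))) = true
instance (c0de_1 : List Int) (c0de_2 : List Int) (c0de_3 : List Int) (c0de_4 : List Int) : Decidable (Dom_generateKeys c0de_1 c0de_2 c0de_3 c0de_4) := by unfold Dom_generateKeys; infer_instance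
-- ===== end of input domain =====

-- ===== PORT A =====
def generateKeys (c0de_1 : List Int) (c0de_2 : List Int) (c0de_3 : List Int) (c0de_4 : List Int) : List String :=
  c0de_1.foldl (fun acc l1 =>
    c0de_2.foldl (fun acc l2 =>
      c0de_3.foldl (fun acc l3 =>
        c0de_4.foldl (fun acc l4 =>
          acc ++ [PySem.Int.toStr (l1 + l2 + l3 + l4)]) acc) acc) acc) []

-- ===== PORT B =====
-- B grows a list of partial sums, one code sequence at a time, stringifying at the end.
def generateKeys_alt (c0de_1 : List Int) (c0de_2 : List Int) (c0de_3 : List Int) (c0de_4 : List Int) : List String :=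
  (([c0de_2, c0de_3, c0de_4].foldl
      (fun acc seq => acc.flatMap (fun a => seq.map (fun b => a + b)))
      c0de_1)).map PySem.Int.toStr

-- ===== PRECONDITION & SPEC =====
def Spec_generateKeys (c0de_1 : List Int) (c0de_2 : List Int) (c0de_3 : List Int) (c0de_4 : List Int) (out : List String) : Prop := out = generateKeys_alt c0de_1 c0de_2 c0de_3 c0de_4
instance (c0de_1 : List Int) (c0de_2 : List Int) (c0de_3 : List Int) (c0de_4 : List Int) (out : List String) : Decidable (Spec_generateKeys c0de_1 c0de_2 c0de_3 c0de_4 out) := by unfold Spec_generateKeys; infer_instance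

-- ===== CLAIM (what is proved, stated in full; the proofs are below) =====
def Claim_equal_generateKeys : Prop := ∀ (c0de_1 : List Int) (c0de_2 : List Int) (c0de_3 : List Int) (c0de_4 : List Int), Dom_generateKeys c0de_1 c0de_2 c0de_3 c0de_4 → Spec_generateKeys c0de_1 c0de_2 c0de_3 c0de_4 (generateKeys c0de_1 c0de_2 c0de_3 c0de_4)

-- ===== LEMMAS AND PROOFS =====

-- ===== VERDICT (by name: the statement is the Claim_ definition above) =====
theorem generateKeys_spec : Claim_equal_generateKeys := by
  intro c1 c2 c3 c4 _
  unfold Spec_generateKeys generateKeys generateKeys_alt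
  simp only [PySem.List.foldl_append_eq_flatMap,
    List.foldl_cons, List.foldl_nil, List.map_flatMap, List.flatMap_map, List.nil_append,
    List.flatMap_assoc]
  simp [List.map_eq_flatMap, List.flatMap_assoc, add_assoc]
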